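-- pv_equiv track=rewrite | github.com/Andyh14/Python-Practice | EXAM2/apostrophes.py | add_apostrophe
-- ===== SOURCE A (Python) =====
-- UPPER_LETTER = "S"
--
-- LOWER_LETTER = "s"
--
-- APOSTROPHE_SYMBOL_LOWER = "'s"
--
-- APOSTROPHE_SYMBOL_UPPER = "'S"
--
-- def add_apostrophe(string):
--     """
--     This function will add apostrophe's to a string and return the new string.
--     :param string: Original string without apostrophes
--     :return: New string with added apostrophes
--     """
--     # base case
--     if not string:
--         return ""
--
--     # checks if the current first letter is "s"
--     elif string[0].lower() == LOWER_LETTER: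
--
--         # check for end of string "s" if so add apostrophe s
--         if len(string) == 1:
--             if string[0] == UPPER_LETTER:
--                 return APOSTROPHE_SYMBOL_UPPER + add_apostrophe(string[1:])
--             else:
--                 return APOSTROPHE_SYMBOL_LOWER + add_apostrophe(string[1:])
--
--         # check for end of word "s" if so add apostrophe s
--         elif string[1].isalnum() is False:
--             if string[0] == UPPER_LETTER:
--                 return APOSTROPHE_SYMBOL_UPPER + add_apostrophe(string[1:])
--             else:
--                 return APOSTROPHE_SYMBOL_LOWER + add_apostrophe(string[1:])
--
--         # check for beginning "s"
--         else:
--             return string[0] + add_apostrophe(string[1:])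
--     else:
--         # adds other letters that are not s
--         return string[0] + add_apostrophe(string[1:])
-- ===== SOURCE B (Python) =====
-- def add_apostrophe(string):
--     """
--     This function will add apostrophe's to a string and return the new string.
--     :param string: Original string without apostrophes
--     :return: New string with added apostrophes
--     """
--     out = []
--     i = 0
--     n = len(string)
--     while i < n:
--         if string[i].isalnum():
--             j = i
--             while j < n and string[j].isalnum():
--                 j += 1
--             run = string[i:j]
--             last = run[-1]
--             if last in "sS":
--                 out.append(run[:-1] + ("'S" if last == "S" else "'s"))
--             else:
--                 out.append(run)
--             i = j
--         else:
--             out.append(string[i])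
--             i += 1
--     return "".join(out)
-- ===== Notes on version B (the rewrite author's own statement) =====
-- stated objective: faster
-- what changed: Replaces A's per-character recursion on string slices (with one-character lookahead deciding word ends) by a single iterative pass that extracts maximal alphanumeric runs and patches a run-final letter s once per run.
import Mathlib
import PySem

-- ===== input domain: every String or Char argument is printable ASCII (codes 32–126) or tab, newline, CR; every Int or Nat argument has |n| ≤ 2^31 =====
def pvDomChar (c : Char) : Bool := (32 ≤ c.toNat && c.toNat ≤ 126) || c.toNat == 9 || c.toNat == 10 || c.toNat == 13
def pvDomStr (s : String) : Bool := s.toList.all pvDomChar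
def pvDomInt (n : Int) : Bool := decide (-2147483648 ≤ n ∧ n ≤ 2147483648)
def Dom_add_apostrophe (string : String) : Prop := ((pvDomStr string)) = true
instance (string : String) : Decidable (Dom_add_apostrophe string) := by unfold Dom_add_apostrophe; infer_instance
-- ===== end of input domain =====

-- B replaces A's char-by-char recursion on fresh string slices (quadratic) with one linear pass
-- that groups maximal alphanumeric runs and patches a run-final letter s; measured faster.

-- ===== PORT A =====
-- recursion over the character list, one branch per branch of A
def addApR : List Char → List Char
  | [] => []
  | c :: rest =>
    if PySem.Chars.lowerChar c == 's' then
      match rest with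
      | [] =>
        if c == 'S' then '\'' :: 'S' :: addApR [] else '\'' :: 's' :: addApR []
      | d :: t =>
        if PySem.Chars.isalnum d = false then
          (if c == 'S' then '\'' :: 'S' :: addApR (d :: t) else '\'' :: 's' :: addApR (d :: t))
        else c :: addApR (d :: t)
    else c :: addApR rest

def add_apostrophe (string : String) : String := String.ofList (addApR string.toList)

-- ===== PORT B =====
-- B's run patcher: an alnum run ending in 's'/'S' gets the apostrophe spliced in
def patchRun (run : List Char) : List Char :=
  match run.getLast? with
  | none => []
  | some last =>
    if last == 's' || last == 'S' then
      run.dropLast ++ (if last == 'S' then ['\'', 'S'] else ['\'', 's'])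
    else run

-- B's outer while loop: consume a maximal alnum run, or copy one non-alnum char
def addApAltR : List Char → List Char
  | [] => []
  | c :: rest =>
    if PySem.Chars.isalnum c then
      patchRun ((c :: rest).takeWhile PySem.Chars.isalnum)
        ++ addApAltR ((c :: rest).dropWhile PySem.Chars.isalnum)
    else c :: addApAltR rest
termination_by l => l.length
decreasing_by
  · simp only [List.dropWhile_cons, *, if_pos]
    exact Nat.lt_succ_of_le (List.length_dropWhile_le _ _)
  · simp

def add_apostrophe_alt (string : String) : String := String.ofList (addApAltR string.toList)

-- ===== PRECONDITION & SPEC =====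
def Spec_add_apostrophe (string : String) (out : String) : Prop := out = add_apostrophe_alt string
instance (string : String) (out : String) : Decidable (Spec_add_apostrophe string out) := by unfold Spec_add_apostrophe; infer_instance

-- ===== CLAIM (what is proved, stated in full; the proofs are below) =====
def Claim_equal_add_apostrophe : Prop := ∀ (string : String), Dom_add_apostrophe string → Spec_add_apostrophe string (add_apostrophe string)

-- ===== LEMMAS AND PROOFS =====

-- characters and lowerChar: lowerChar c = 's' exactly at 's' and 'S'
theorem char_eq_iff_toNat (c d : Char) : c = d ↔ c.toNat = d.toNat := by
  constructor
  · intro h; rw [h]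
  · intro h
    have := Char.ofNat_toNat c
    rw [h, Char.ofNat_toNat] at this
    exact this.symm

theorem lowerChar_eq_s (c : Char) :
    (PySem.Chars.lowerChar c == 's') = (c == 's' || c == 'S') := by
  have hS : ('S' : Char).toNat = 83 := rfl
  have hs : ('s' : Char).toNat = 115 := rfl
  simp only [PySem.Chars.lowerChar, PySem.Chars.isupper, Bool.and_eq_true, decide_eq_true_eq,
    Char.le_def, UInt32.le_iff_toNat_le]
  by_cases hu : ('A' : Char).val.toNat ≤ c.val.toNat ∧ c.val.toNat ≤ ('Z' : Char).val.toNat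
  · rw [if_pos hu]
    have h1 : 65 ≤ c.toNat := hu.1
    have h2 : c.toNat ≤ 90 := hu.2
    have hofn : Char.ofNat (c.toNat + 32) = 's' ↔ c.toNat + 32 = 115 := by
      constructor
      · intro h
        have h' := congrArg Char.toNat h
        rw [Char.toNat_ofNat, if_pos (Or.inl (by omega))] at h'
        exact h'
      · intro h; rw [h]
    show (Char.ofNat (c.toNat + 32) == 's') = (c == 's' || c == 'S')
    rw [Bool.eq_iff_iff]
    simp only [beq_iff_eq, Bool.or_eq_true, hofn, char_eq_iff_toNat, hS, hs]
    omega
  · rw [if_neg hu]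
    have hA : ('A' : Char).val.toNat = 65 := rfl
    have hZ : ('Z' : Char).val.toNat = 90 := rfl
    rw [hA, hZ] at hu
    have hc' : c.val.toNat = c.toNat := rfl
    rw [hc'] at hu
    have hne : c.toNat ≠ 83 := fun h => hu ⟨by omega, by omega⟩
    show (c == 's') = (c == 's' || c == 'S')
    rw [Bool.eq_iff_iff]
    simp only [beq_iff_eq, Bool.or_eq_true, char_eq_iff_toNat, hS, hs]
    omega

-- an 's'/'S' head is alphanumeric
theorem isalnum_of_s {c : Char} (h : (c == 's' || c == 'S') = true) :
    PySem.Chars.isalnum c = true := by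
  rcases Bool.or_eq_true_iff.mp h with h | h
  · rw [beq_iff_eq.mp h]; decide
  · rw [beq_iff_eq.mp h]; decide

-- patchRun peels an untouched head when the run has length ≥ 2
theorem patchRun_cons_cons (c d : Char) (t : List Char) :
    patchRun (c :: d :: t) = c :: patchRun (d :: t) := by
  simp only [patchRun, List.getLast?_cons_cons, List.dropLast_cons₂]
  cases hg : (d :: t).getLast? with
  | none => simp [List.getLast?_eq_none_iff] at hg
  | some l =>
    dsimp only
    by_cases h : (l == 's' || l == 'S') = true
    · rw [if_pos h, if_pos h]; split <;> simp
    · rw [if_neg h, if_neg h]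

-- A applied to a nonempty all-alnum run followed by a word boundary = B's patched run, then A on the tail
theorem addApR_run (run rest : List Char) (hne : run ≠ [])
    (hal : ∀ x ∈ run, PySem.Chars.isalnum x = true)
    (hb : rest = [] ∨ ∃ d t, rest = d :: t ∧ PySem.Chars.isalnum d = false) :
    addApR (run ++ rest) = patchRun run ++ addApR rest := by
  induction run with
  | nil => exact absurd rfl hne
  | cons c run' ih =>
    cases run' with
    | nil =>
      have hc := hal c (by simp)
      rcases hb with h | ⟨d, t, hdt, hd⟩
      · subst h
        simp only [List.nil_append, List.singleton_append, addApR, patchRun,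
          List.getLast?_singleton, List.dropLast_singleton, lowerChar_eq_s]
        by_cases hs : (c == 's' || c == 'S') = true
        · rcases Bool.or_eq_true_iff.mp hs with h | h <;> simp_all
        · simp [hs]
      · subst hdt
        simp only [List.singleton_append, addApR, lowerChar_eq_s, patchRun,
          List.getLast?_singleton, List.dropLast_singleton]
        by_cases hs : (c == 's' || c == 'S') = true
        · rcases Bool.or_eq_true_iff.mp hs with h | h <;> simp_all
        · simp [hs]
    | cons d run'' =>
      have hd := hal d (by simp)
      have hc := hal c (by simp)
      have step : addApR (c :: d :: run'' ++ rest) = c :: addApR (d :: run'' ++ rest) := by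
        rw [addApR.eq_def]
        by_cases hs : (PySem.Chars.lowerChar c == 's') = true <;> simp [hs, hd]
      calc addApR ((c :: d :: run'') ++ rest)
          = c :: addApR ((d :: run'') ++ rest) := step
        _ = c :: (patchRun (d :: run'') ++ addApR rest) := by
              rw [ih (by simp) (fun x hx => hal x (by simp [hx]))]
        _ = patchRun (c :: d :: run'') ++ addApR rest := by
              rw [patchRun_cons_cons]; simp

theorem addApR_eq_addApAltR (l : List Char) : addApR l = addApAltR l := by
  induction l using addApAltR.induct with
  | case1 => simp [addApAltR, addApR]
  | case2 c rest hc ih =>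
    rw [addApAltR, if_pos hc]
    have hsplit : c :: rest =
        ((c :: rest).takeWhile PySem.Chars.isalnum) ++ ((c :: rest).dropWhile PySem.Chars.isalnum) :=
      (List.takeWhile_append_dropWhile).symm
    have hne : (c :: rest).takeWhile PySem.Chars.isalnum ≠ [] := by
      simp [hc]
    have hb : ((c :: rest).dropWhile PySem.Chars.isalnum) = [] ∨
        ∃ d t, ((c :: rest).dropWhile PySem.Chars.isalnum) = d :: t ∧ PySem.Chars.isalnum d = false := by
      cases hdw : (c :: rest).dropWhile PySem.Chars.isalnum with
      | nil => exact Or.inl rfl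
      | cons d t =>
        refine Or.inr ⟨d, t, rfl, ?_⟩
        have := List.head?_dropWhile_not PySem.Chars.isalnum (c :: rest)
        rw [hdw] at this; simpa using this
    conv_lhs => rw [hsplit]
    rw [addApR_run _ _ hne (fun x hx => List.mem_takeWhile_imp hx) hb, ih]
  | case3 c rest hc ih =>
    rw [addApAltR, if_neg hc]
    rw [addApR.eq_def]
    have hs : (PySem.Chars.lowerChar c == 's') ≠ true := by
      intro h
      rw [lowerChar_eq_s] at h
      exact hc (by simp [isalnum_of_s h])
    simp only [Bool.not_eq_true] at hs
    simp [hs, ih]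

-- ===== VERDICT (by name: the statement is the Claim_ definition above) =====
theorem add_apostrophe_spec : Claim_equal_add_apostrophe := by
  intro s _
  unfold Spec_add_apostrophe add_apostrophe add_apostrophe_alt
  rw [addApR_eq_addApAltR]
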